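-- pv_equiv track=rewrite | github.com/adeboni/laser-projector | 2024/software/server/robbie_generators.py | expand_morse_code
-- ===== SOURCE A (Python) =====
-- MORSE_CODE_DICT = {
--     'A' : '.-', 'B' : '-...',
--     'C' : '-.-.', 'D' : '-..', 'E' : '.',
--     'F' : '..-.', 'G' : '--.', 'H' : '....',
--     'I' : '..', 'J' : '.---', 'K' : '-.-',
--     'L' : '.-..', 'M' : '--', 'N' : '-.',
--     'O' : '---', 'P' : '.--.', 'Q' : '--.-',
--     'R' : '.-.', 'S' : '...', 'T' : '-',
--     'U' : '..-', 'V' : '...-', 'W' : '.--',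
--     'X' : '-..-', 'Y' : '-.--', 'Z' : '--..'
-- }
--
-- def expand_morse_code(text: str) -> list[int]:
--     result = []
--     for char in text:
--         if char == ' ':
--             result.extend([0] * 4)
--         elif char in MORSE_CODE_DICT:
--             for morse_char in MORSE_CODE_DICT[char]:
--                 if morse_char == '.':
--                     result.extend([255] * 1)
--                 elif morse_char == '-':
--                     result.extend([255] * 3)
--                 result.extend([0] * 1)
--             result.extend([0] * 3)
--     result.extend([0] * 7)
--     return result
-- ===== SOURCE B (Python) =====
-- MORSE_CODE_DICT = {
--     'A' : '.-', 'B' : '-...',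
--     'C' : '-.-.', 'D' : '-..', 'E' : '.',
--     'F' : '..-.', 'G' : '--.', 'H' : '....',
--     'I' : '..', 'J' : '.---', 'K' : '-.-',
--     'L' : '.-..', 'M' : '--', 'N' : '-.',
--     'O' : '---', 'P' : '.--.', 'Q' : '--.-',
--     'R' : '.-.', 'S' : '...', 'T' : '-',
--     'U' : '..-', 'V' : '...-', 'W' : '.--',
--     'X' : '-..-', 'Y' : '-.--', 'Z' : '--..'
-- }
--
-- # Precompute once: finished pulse list for every encodable character.
-- PULSE = {' ': [0, 0, 0, 0]}
-- for _ch, _code in MORSE_CODE_DICT.items():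
--     PULSE[_ch] = [p for s in _code for p in ([255, 0] if s == '.' else [255, 255, 255, 0])] + [0, 0, 0]
--
-- def expand_morse_code(text: str) -> list[int]:
--     out = []
--     for ch in text:
--         out += PULSE.get(ch, [])
--     return out + [0] * 7
-- ===== Notes on version B (the rewrite author's own statement) =====
-- stated objective: simpler
-- what changed: B precomputes once a table mapping every encodable character to its finished pulse list (symbol expansion plus per-letter trailing zeros done at table-build time), so the function body is a single flat pass with one table lookup per character instead of A's nested per-symbol loop with branches.
import Mathlib
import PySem

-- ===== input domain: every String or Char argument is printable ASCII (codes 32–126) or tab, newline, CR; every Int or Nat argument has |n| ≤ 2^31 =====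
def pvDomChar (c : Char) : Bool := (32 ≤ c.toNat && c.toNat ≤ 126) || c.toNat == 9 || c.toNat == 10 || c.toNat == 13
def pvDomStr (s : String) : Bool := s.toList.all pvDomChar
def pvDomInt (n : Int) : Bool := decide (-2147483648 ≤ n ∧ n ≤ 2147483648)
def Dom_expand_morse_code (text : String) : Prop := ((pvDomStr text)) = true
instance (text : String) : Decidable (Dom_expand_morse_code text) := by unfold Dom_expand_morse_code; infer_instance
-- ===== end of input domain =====

-- B precomputes once a table mapping each encodable char to its finished pulse list, turning the
-- nested per-symbol loop of A into a single flat pass (objective: simpler decomposition).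

-- shared module-level data (MORSE_CODE_DICT in both Source A and Source B)
def morseDict : PySem.Dict Char String := PySem.Dict.ofList
  [('A', ".-"), ('B', "-..."), ('C', "-.-."), ('D', "-.."), ('E', "."),
   ('F', "..-."), ('G', "--."), ('H', "...."), ('I', ".."), ('J', ".---"),
   ('K', "-.-"), ('L', ".-.."), ('M', "--"), ('N', "-."), ('O', "---"),
   ('P', ".--."), ('Q', "--.-"), ('R', ".-."), ('S', "..."), ('T', "-"),
   ('U', "..-"), ('V', "...-"), ('W', ".--"), ('X', "-..-"), ('Y', "-.--"),
   ('Z', "--..")]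

-- ===== PORT A =====
def expand_morse_code (text : String) : List Int :=
  (text.toList.foldl (fun result char =>
    if char = ' ' then
      result ++ List.replicate 4 (0 : Int)
    else
      match PySem.Dict.get? morseDict char with
      | some code =>
          (code.toList.foldl (fun r morse_char =>
              (if morse_char = '.' then r ++ List.replicate 1 (255 : Int)
               else if morse_char = '-' then r ++ List.replicate 3 (255 : Int)
               else r) ++ List.replicate 1 (0 : Int)) result)
            ++ List.replicate 3 (0 : Int)
      | none => result) []) ++ List.replicate 7 (0 : Int)

-- ===== PORT B =====
-- PULSE built once at module level, as in Source B
def pulseTable : PySem.Dict Char (List Int) :=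
  morseDict.items.foldl (fun d kv =>
      PySem.Dict.insert d kv.1
        ((kv.2.toList.flatMap fun s =>
            if s = '.' then [255, 0] else [255, 255, 255, 0]) ++ [0, 0, 0]))
    (PySem.Dict.insert PySem.Dict.empty ' ' [0, 0, 0, 0])

def expand_morse_code_alt (text : String) : List Int :=
  (text.toList.foldl (fun out ch => out ++ PySem.Dict.getD pulseTable ch []) [])
    ++ List.replicate 7 (0 : Int)

-- ===== PRECONDITION & SPEC =====
def Spec_expand_morse_code (text : String) (out : List Int) : Prop := out = expand_morse_code_alt text
instance (text : String) (out : List Int) : Decidable (Spec_expand_morse_code text out) := by unfold Spec_expand_morse_code; infer_instance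

-- ===== CLAIM (what is proved, stated in full; the proofs are below) =====
def Claim_equal_expand_morse_code : Prop := ∀ (text : String), Dom_expand_morse_code text → Spec_expand_morse_code text (expand_morse_code text)

-- ===== LEMMAS AND PROOFS =====

-- A's per-character contribution, computed with an empty accumulator
def pieceA (char : Char) : List Int :=
  if char = ' ' then
    List.replicate 4 (0 : Int)
  else
    match PySem.Dict.get? morseDict char with
    | some code =>
        (code.toList.foldl (fun r morse_char =>
            (if morse_char = '.' then r ++ List.replicate 1 (255 : Int)
             else if morse_char = '-' then r ++ List.replicate 3 (255 : Int)
             else r) ++ List.replicate 1 (0 : Int)) [])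
          ++ List.replicate 3 (0 : Int)
    | none => []

-- the inner symbol loop is accumulator-prefixed
theorem innerA_append (code : List Char) (r : List Int) :
    code.foldl (fun r morse_char =>
        (if morse_char = '.' then r ++ List.replicate 1 (255 : Int)
         else if morse_char = '-' then r ++ List.replicate 3 (255 : Int)
         else r) ++ List.replicate 1 (0 : Int)) r
    = r ++ code.foldl (fun r morse_char =>
        (if morse_char = '.' then r ++ List.replicate 1 (255 : Int)
         else if morse_char = '-' then r ++ List.replicate 3 (255 : Int)
         else r) ++ List.replicate 1 (0 : Int)) [] := by
  induction code generalizing r with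
  | nil => simp
  | cons c cs ih =>
    simp only [List.foldl_cons]
    rw [ih, ih ((if c = '.' then [] ++ _ else if c = '-' then [] ++ _ else []) ++ _)]
    split_ifs <;> simp

theorem stepA_append (res : List Int) (char : Char) :
    (if char = ' ' then
      res ++ List.replicate 4 (0 : Int)
    else
      match PySem.Dict.get? morseDict char with
      | some code =>
          (code.toList.foldl (fun r morse_char =>
              (if morse_char = '.' then r ++ List.replicate 1 (255 : Int)
               else if morse_char = '-' then r ++ List.replicate 3 (255 : Int)
               else r) ++ List.replicate 1 (0 : Int)) res)
            ++ List.replicate 3 (0 : Int)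
      | none => res)
    = res ++ pieceA char := by
  unfold pieceA
  split_ifs with h
  · rfl
  · rcases hg : PySem.Dict.get? morseDict char with _ | code
    · simp [hg]
    · simp only [hg]
      rw [innerA_append]; simp

-- per-character agreement, checked on all 127 characters Dom admits
theorem piece_eq (c : Char) (h : pvDomChar c = true) :
    pieceA c = PySem.Dict.getD pulseTable c [] := by
  have hlt : c.toNat < 127 := by
    simp only [pvDomChar, Bool.or_eq_true, Bool.and_eq_true, decide_eq_true_eq, beq_iff_eq] at h
    omega
  have hc : Char.ofNat c.toNat = c := Char.ofNat_toNat c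
  have hall : ∀ n < 127, pieceA (Char.ofNat n) = PySem.Dict.getD pulseTable (Char.ofNat n) [] := by
    have hb : (List.range 127).all
        (fun n => pieceA (Char.ofNat n) == PySem.Dict.getD pulseTable (Char.ofNat n) []) = true := by
      decide
    intro n hn
    have := List.all_eq_true.mp hb n (List.mem_range.mpr hn)
    exact beq_iff_eq.mp this
  rw [← hc]
  exact hall c.toNat hlt

theorem expand_morse_code_spec' (text : String) (hd : Dom_expand_morse_code text) :
    expand_morse_code text = expand_morse_code_alt text := by
  unfold expand_morse_code expand_morse_code_alt
  congr 1
  have hA : text.toList.foldl (fun result char =>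
      if char = ' ' then
        result ++ List.replicate 4 (0 : Int)
      else
        match PySem.Dict.get? morseDict char with
        | some code =>
            (code.toList.foldl (fun r morse_char =>
                (if morse_char = '.' then r ++ List.replicate 1 (255 : Int)
                 else if morse_char = '-' then r ++ List.replicate 3 (255 : Int)
                 else r) ++ List.replicate 1 (0 : Int)) result)
              ++ List.replicate 3 (0 : Int)
        | none => result) []
      = text.toList.foldl (fun res char => res ++ pieceA char) [] := by
    apply PySem.List.foldl_congr_mem
    intro acc c _
    exact stepA_append acc c
  rw [hA, PySem.List.foldl_append_eq_flatMap, PySem.List.foldl_append_eq_flatMap]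
  simp only [List.nil_append]
  apply List.flatMap_congr
  intro c hc
  have : pvDomChar c = true := by
    have := hd
    simp only [Dom_expand_morse_code, pvDomStr, List.all_eq_true] at this
    exact this c hc
  exact piece_eq c this

-- ===== VERDICT (by name: the statement is the Claim_ definition above) =====
theorem expand_morse_code_spec : Claim_equal_expand_morse_code := by
  intro text hd
  unfold Spec_expand_morse_code
  exact expand_morse_code_spec' text hd
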